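-- pv_equiv track=rewrite | github.com/Algoroxyolo/PersonaCollapse | persona_sim/prompts.py | generate_all_persona_profiles
-- ===== SOURCE A (Python) =====
-- from itertools import product
--
-- def generate_all_persona_profiles(dimensions):
--     """Generate the Cartesian product of persona dimension values.
--
--     Args:
--         dimensions: dict mapping dimension name to list of possible values.
--
--     Returns:
--         A list of profile dicts.
--
--     Raises:
--         ValueError: If *dimensions* is empty or None.
--     """
--     if not dimensions:
--         raise ValueError(
--             "dimensions must be a non-empty dict. "
--             "Use load_sampled_personas() for JSON-based persona loading."
--         )
--
--     profiles = []
--     dimension_names = list(dimensions.keys())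
--     dimension_values = [dimensions[dim] for dim in dimension_names]
--
--     for combination in product(*dimension_values):
--         profile = {dim: val for dim, val in zip(dimension_names, combination)}
--         profiles.append(profile)
--
--     return profiles
-- ===== SOURCE B (Python) =====
-- def generate_all_persona_profiles(dimensions):
--     """Generate the Cartesian product of persona dimension values.
--
--     Builds the product incrementally: a growing list of partial profile
--     dicts, extended one dimension at a time.
--     """
--     if not dimensions:
--         raise ValueError(
--             "dimensions must be a non-empty dict. "
--             "Use load_sampled_personas() for JSON-based persona loading."
--         )
--
--     profiles = [{}]
--     for name, values in dimensions.items():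
--         profiles = [{**partial, name: value}
--                     for partial in profiles
--                     for value in values]
--     return profiles
-- ===== Notes on version B (the rewrite author's own statement) =====
-- stated objective: alternative
-- what changed: Replaces itertools.product over pre-collected value lists plus a per-combination dict comprehension by an incremental build that maintains a list of partial profile dicts and extends each by one dimension per iteration.
import Mathlib
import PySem

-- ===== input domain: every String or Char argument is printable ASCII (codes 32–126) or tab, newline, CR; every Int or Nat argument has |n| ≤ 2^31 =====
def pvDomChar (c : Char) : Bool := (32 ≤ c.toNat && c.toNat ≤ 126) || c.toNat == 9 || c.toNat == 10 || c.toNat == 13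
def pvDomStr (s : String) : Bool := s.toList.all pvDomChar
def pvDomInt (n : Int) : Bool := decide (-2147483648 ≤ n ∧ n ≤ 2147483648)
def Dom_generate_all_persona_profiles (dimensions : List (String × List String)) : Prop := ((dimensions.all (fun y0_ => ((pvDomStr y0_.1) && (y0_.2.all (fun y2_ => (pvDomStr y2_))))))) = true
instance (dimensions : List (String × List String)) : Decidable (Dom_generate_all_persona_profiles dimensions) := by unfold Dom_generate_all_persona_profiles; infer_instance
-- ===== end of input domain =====

-- B builds the product incrementally over a list of partial profile dicts instead of
-- itertools.product plus a per-combination dict comprehension (alternative decomposition, same cost).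


-- ===== PORT A =====
-- itertools.product(*value_lists): first list varies slowest
def pvProduct (vals : List (List String)) : List (List String) :=
  match vals with
  | [] => [[]]
  | v :: rest => v.flatMap (fun x => (pvProduct rest).map (fun c => x :: c))

def generate_all_persona_profiles (dimensions : List (String × List String)) : List (List (String × String)) :=
  -- 'if not dimensions: raise ValueError' → excluded by Pre_
  let dimension_names := dimensions.map (·.1)
  -- dimensions[dim]: first-match lookup; dim is always a present key, so getD's default is never used
  let dimension_values := dimension_names.map (fun dim => (PySem.Dict.mk dimensions).getD dim [])
  (pvProduct dimension_values).map (fun combination =>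
    ((dimension_names.zip combination).foldl
      (fun (profile : PySem.Dict String String) p => profile.insert p.1 p.2)
      PySem.Dict.empty).items)

-- ===== PORT B =====
def generate_all_persona_profiles_alt (dimensions : List (String × List String)) : List (List (String × String)) :=
  -- 'if not dimensions: raise ValueError' → excluded by Pre_
  (dimensions.foldl
    (fun (profiles : List (PySem.Dict String String)) nv =>
      profiles.flatMap (fun partial_ => nv.2.map (fun value => partial_.insert nv.1 value)))
    [PySem.Dict.empty]).map (·.items)

-- ===== PRECONDITION & SPEC =====
-- Pre_ excludes the empty dict, on which A raises ValueError, and requires distinct keys,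
-- which every assoc list arising from a Python dict has by construction.
def Pre_generate_all_persona_profiles (dimensions : List (String × List String)) : Prop :=
  dimensions ≠ [] ∧ (dimensions.map (·.1)).Nodup
instance (dimensions : List (String × List String)) : Decidable (Pre_generate_all_persona_profiles dimensions) := by unfold Pre_generate_all_persona_profiles; infer_instance

def pvWitness_generate_all_persona_profiles : (List (String × List String)) :=
  [("tone", ["formal", "casual"]), ("age", ["young"])]

def Spec_generate_all_persona_profiles (dimensions : List (String × List String)) (out : List (List (String × String))) : Prop := out = generate_all_persona_profiles_alt dimensions
instance (dimensions : List (String × List String)) (out : List (List (String × String))) : Decidable (Spec_generate_all_persona_profiles dimensions out) := by unfold Spec_generate_all_persona_profiles; infer_instance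

-- ===== CLAIM (what is proved, stated in full; the proofs are below) =====
def Claim_equal_generate_all_persona_profiles : Prop := ∀ (dimensions : List (String × List String)), Dom_generate_all_persona_profiles dimensions → Pre_generate_all_persona_profiles dimensions → Spec_generate_all_persona_profiles dimensions (generate_all_persona_profiles dimensions)

-- ===== LEMMAS AND PROOFS =====

-- the pure (assoc-list) incremental build both sides are reduced to
def pvStep (ps : List (List (String × String))) (nv : String × List String) : List (List (String × String)) :=
  ps.flatMap (fun p => nv.2.map (fun v => p ++ [(nv.1, v)]))

lemma pvProduct_length {vals : List (List String)} {c : List String}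
    (hc : c ∈ pvProduct vals) : c.length = vals.length := by
  induction vals generalizing c with
  | nil => simp [pvProduct] at hc; simp [hc]
  | cons v rest ih =>
    simp [pvProduct] at hc
    obtain ⟨x, _, c', hc', rfl⟩ := hc
    simp [ih hc']

-- A's shape as the pure fold, generalized over an accumulator
lemma pvFold_eq (dims : List (String × List String)) (acc : List (List (String × String))) :
    dims.foldl pvStep acc =
      acc.flatMap (fun p => (pvProduct (dims.map (·.2))).map
        (fun c => p ++ (dims.map (·.1)).zip c)) := by
  induction dims generalizing acc with
  | nil => simp [pvProduct]
  | cons nv rest ih =>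
    simp only [List.foldl_cons, ih, pvStep, pvProduct, List.map_cons]
    simp only [List.flatMap_assoc]
    congr 1; funext p
    simp only [List.flatMap_map, List.map_flatMap, List.map_map]
    congr 1; funext v
    congr 1; funext c
    simp [List.zip_cons_cons]

lemma pvFold_init (dims : List (String × List String)) :
    dims.foldl pvStep [[]] =
      (pvProduct (dims.map (·.2))).map (fun c => (dims.map (·.1)).zip c) := by
  rw [pvFold_eq]; simp

-- nodup lookup: each listed key looks up its own value
lemma pvLookup_self (dims : List (String × List String))
    (hnd : (dims.map (·.1)).Nodup) {k : String} {v : List String}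
    (hm : (k, v) ∈ dims) : (PySem.Dict.mk dims).getD k [] = v := by
  apply PySem.Dict.getD_of_mem_items
  · simpa [PySem.Dict.items] using hm
  · simpa [PySem.Dict.keys, PySem.Dict.items] using hnd

lemma pvValues_eq (dims : List (String × List String))
    (hnd : (dims.map (·.1)).Nodup) :
    (dims.map (·.1)).map (fun dim => (PySem.Dict.mk dims).getD dim []) = dims.map (·.2) := by
  rw [List.map_map, List.map_eq_map_iff]
  intro p hp
  exact pvLookup_self dims hnd hp

-- building a dict from a nodup fresh assoc list gives back that list as items
lemma pvDict_items (l : List (String × String)) (hnd : (l.map (·.1)).Nodup) :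
    (l.foldl (fun (d : PySem.Dict String String) p => d.insert p.1 p.2)
      PySem.Dict.empty).items = l := by
  have h := PySem.Dict.items_foldl_insert_fresh (l := l) (k := (·.1)) (v := (·.2))
    (d := PySem.Dict.empty) (by intro a _; simp) hnd
  simpa using h

-- A equals the pure fold
lemma pvA_eq (dims : List (String × List String)) (hnd : (dims.map (·.1)).Nodup) :
    generate_all_persona_profiles dims = dims.foldl pvStep [[]] := by
  rw [pvFold_init]
  show (pvProduct ((dims.map (·.1)).map (fun dim => (PySem.Dict.mk dims).getD dim []))).map
      (fun combination =>
        (((dims.map (·.1)).zip combination).foldl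
          (fun (profile : PySem.Dict String String) p => profile.insert p.1 p.2)
          PySem.Dict.empty).items) = _
  rw [pvValues_eq dims hnd]
  apply List.map_congr_left
  intro c hc
  apply pvDict_items
  have hlen : c.length = dims.length := by
    simpa using pvProduct_length hc
  have : ((dims.map (·.1)).zip c).map (·.1) = dims.map (·.1) := by
    apply List.map_fst_zip
    simp [hlen]
  rw [this]; exact hnd

-- B equals the pure fold: invariant — every accumulated dict has nodup keys disjoint
-- from the names still to be processed
lemma pvB_eq_aux (dims : List (String × List String)) (hnd : (dims.map (·.1)).Nodup)
    (acc : List (PySem.Dict String String))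
    (hinv : ∀ d ∈ acc, d.keys.Nodup ∧ ∀ k ∈ d.keys, k ∉ dims.map (·.1)) :
    (dims.foldl
      (fun (profiles : List (PySem.Dict String String)) nv =>
        profiles.flatMap (fun p => nv.2.map (fun v => p.insert nv.1 v)))
      acc).map (·.items) = dims.foldl pvStep (acc.map (·.items)) := by
  induction dims generalizing acc with
  | nil => simp
  | cons nv rest ih =>
    simp only [List.foldl_cons]
    have hnv : nv.1 ∉ rest.map (·.1) := by
      simp only [List.map_cons, List.nodup_cons] at hnd; exact hnd.1
    have hndr : (rest.map (·.1)).Nodup := by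
      simp only [List.map_cons, List.nodup_cons] at hnd; exact hnd.2
    have hinv' : ∀ d ∈ acc.flatMap (fun p => nv.2.map (fun v => p.insert nv.1 v)),
        d.keys.Nodup ∧ ∀ k ∈ d.keys, k ∉ rest.map (·.1) := by
      intro d hd
      simp only [List.mem_flatMap, List.mem_map] at hd
      obtain ⟨p, hp, v, _, rfl⟩ := hd
      obtain ⟨hpn, hpf⟩ := hinv p hp
      refine ⟨PySem.Dict.nodup_keys_insert _ _ _ hpn, ?_⟩
      intro k hk
      rcases (PySem.Dict.mem_keys_insert _ _ _ _).mp hk with rfl | hk'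
      · exact hnv
      · intro hmem
        exact hpf k hk' (by simp [hmem])
    rw [ih hndr _ hinv']
    congr 1
    simp only [pvStep, List.map_flatMap, List.flatMap_map, List.map_map]
    apply List.flatMap_congr
    intro p hp
    obtain ⟨hpn, hpf⟩ := hinv p hp
    have hfresh : p.contains nv.1 = false := by
      rw [← Bool.not_eq_true, PySem.Dict.contains_iff_mem_keys]
      intro hk
      exact hpf nv.1 hk (by simp)
    apply List.map_congr_left
    intro v _
    simp [PySem.Dict.items_insert_of_not_contains _ _ hfresh]

lemma pvB_eq (dims : List (String × List String)) (hnd : (dims.map (·.1)).Nodup) :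
    generate_all_persona_profiles_alt dims = dims.foldl pvStep [[]] := by
  unfold generate_all_persona_profiles_alt
  rw [pvB_eq_aux dims hnd [PySem.Dict.empty] (by simp [PySem.Dict.keys_empty])]
  simp [PySem.Dict.empty]

-- ===== VERDICT (by name: the statement is the Claim_ definition above) =====
theorem generate_all_persona_profiles_spec : Claim_equal_generate_all_persona_profiles := by
  intro dims _ hpre
  unfold Spec_generate_all_persona_profiles
  rw [pvA_eq dims hpre.2, pvB_eq dims hpre.2]
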